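-- pv_equiv track=rewrite | github.com/peacewalker122/simple-redis | server.py | _get_argc
-- ===== SOURCE A (Python) =====
-- def _get_argc(cmd: str) -> int:
--     if cmd.startswith("*"):
--         result = 0
--         for i in range(1, len(cmd)):
--             if cmd[i].isdigit():
--                 result = result * 10 + int(cmd[i])
--
--         return result
--
--     return 0
-- ===== SOURCE B (Python) =====
-- def _get_argc(cmd: str) -> int:
--     # Same result as A: separate digit-filter pass, then assemble the number
--     # back-to-front from place values instead of forward Horner accumulation.
--     if not cmd.startswith("*"):
--         return 0
--     digits = [c for c in cmd[1:] if c.isdigit()]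
--     total = 0
--     place = 1
--     for c in reversed(digits):
--         total += int(c) * place
--         place *= 10
--     return total
-- ===== Notes on version B (the rewrite author's own statement) =====
-- stated objective: alternative
-- what changed: B first collects the digit characters of cmd[1:] in a separate filter pass and then assembles the value back-to-front with an explicit place-value accumulator (total, place), instead of A's single forward Horner loop with an inline digit test.
import Mathlib
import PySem

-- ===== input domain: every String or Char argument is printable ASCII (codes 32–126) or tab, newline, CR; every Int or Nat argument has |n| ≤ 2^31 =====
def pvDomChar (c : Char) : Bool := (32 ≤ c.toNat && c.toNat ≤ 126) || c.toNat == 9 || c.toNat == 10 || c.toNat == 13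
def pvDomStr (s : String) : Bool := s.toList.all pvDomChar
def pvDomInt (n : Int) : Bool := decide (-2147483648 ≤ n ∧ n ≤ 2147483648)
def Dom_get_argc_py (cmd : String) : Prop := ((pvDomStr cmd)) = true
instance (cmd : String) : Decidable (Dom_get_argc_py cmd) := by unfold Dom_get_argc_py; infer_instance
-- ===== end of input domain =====

-- B replaces A's single forward Horner loop (inline digit test) by a digit-filter
-- pass followed by a back-to-front place-value accumulation (objective: alternative).

-- ===== PORT A =====
-- int(cmd[i]) under the isdigit guard is exactly the digit's value: (c.toNat : Int) - 48.
def get_argc_py (cmd : String) : Int :=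
  if PySem.Str.startswith cmd "*" then
    (PySem.List.pyRange 1 (PySem.Str.len cmd) 1).foldl
      (fun result i =>
        let c := PySem.List.pyGetD cmd.toList i ' '
        if PySem.Chars.isdigit c then result * 10 + ((c.toNat : Int) - 48) else result)
      0
  else 0

-- ===== PORT B =====
-- int(c) for a digit character c is exactly (c.toNat : Int) - 48.
def get_argc_py_alt (cmd : String) : Int :=
  if PySem.Str.startswith cmd "*" then
    let digits := (PySem.List.slice cmd.toList (some 1) none).filter
        (fun c => PySem.Chars.isdigit c)
    (digits.reverse.foldl
      (fun (s : Int × Int) c => (s.1 + ((c.toNat : Int) - 48) * s.2, s.2 * 10))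
      (0, 1)).1
  else 0

-- ===== PRECONDITION & SPEC =====
def Spec_get_argc_py (cmd : String) (out : Int) : Prop := out = get_argc_py_alt cmd
instance (cmd : String) (out : Int) : Decidable (Spec_get_argc_py cmd out) := by unfold Spec_get_argc_py; infer_instance

-- ===== CLAIM (what is proved, stated in full; the proofs are below) =====
def Claim_equal_get_argc_py : Prop := ∀ (cmd : String), Dom_get_argc_py cmd → Spec_get_argc_py cmd (get_argc_py cmd)

-- ===== LEMMAS AND PROOFS =====

-- A's loop body, with the digit test folded in, equals the pure Horner step over the filtered list.
theorem pv_fold_filter (l : List Char) (acc : Int) :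
    l.foldl (fun r c => if PySem.Chars.isdigit c then r * 10 + ((c.toNat : Int) - 48) else r) acc
      = (l.filter (fun c => PySem.Chars.isdigit c)).foldl
          (fun r c => r * 10 + ((c.toNat : Int) - 48)) acc := by
  induction l generalizing acc with
  | nil => rfl
  | cons a t ih =>
      by_cases h : PySem.Chars.isdigit a <;>
        simp [List.foldl_cons, h, ih]

-- Horner with a nonzero accumulator shifts by a power of ten.
theorem pv_horner_shift (l : List Char) (acc : Int) :
    l.foldl (fun r c => r * 10 + ((c.toNat : Int) - 48)) acc
      = acc * 10 ^ l.length + l.foldl (fun r c => r * 10 + ((c.toNat : Int) - 48)) 0 := by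
  induction l generalizing acc with
  | nil => simp
  | cons a t ih =>
      simp only [List.foldl_cons, List.length_cons]
      rw [ih (acc * 10 + _), ih (0 * 10 + _)]
      ring

-- B's reversed place-value loop computes (Horner value, 10^length).
theorem pv_rev_place (l : List Char) :
    l.reverse.foldl
        (fun (s : Int × Int) c => (s.1 + ((c.toNat : Int) - 48) * s.2, s.2 * 10)) (0, 1)
      = (l.foldl (fun r c => r * 10 + ((c.toNat : Int) - 48)) 0, 10 ^ l.length) := by
  induction l with
  | nil => rfl
  | cons a t ih =>
      simp only [List.reverse_cons, List.foldl_append, ih, List.foldl_cons, List.foldl_nil,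
        List.length_cons]
      rw [pv_horner_shift t (0 * 10 + ((a.toNat : Int) - 48))]
      simp only [Prod.mk.injEq]
      constructor <;> ring

-- ===== VERDICT (by name: the statement is the Claim_ definition above) =====
theorem get_argc_py_spec : Claim_equal_get_argc_py := by
  intro cmd _
  unfold Spec_get_argc_py get_argc_py get_argc_py_alt
  simp only [PySem.Str.startswith_eq]
  by_cases h : PySem.Chars.startswith cmd.toList "*".toList = true
  · rw [if_pos h, if_pos h]
    have hr := PySem.List.foldl_pyRange_pyGetD' cmd.toList ' '
        (fun (r : Int) c => if PySem.Chars.isdigit c then r * 10 + ((c.toNat : Int) - 48) else r)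
        0 (a := 1) (by norm_num)
    beta_reduce at hr
    rw [show PySem.Str.len cmd = ((cmd.toList.length : Int)) by simp [PySem.Str.len], hr,
        PySem.List.slice_from cmd.toList (by norm_num : (0:Int) ≤ 1),
        pv_fold_filter, pv_rev_place]
  · rw [if_neg h, if_neg h]
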